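-- pv_equiv track=rewrite | github.com/behenate/wdi-python-wiet | Zestaw_6/16.py | can_build
-- ===== SOURCE A (Python) =====
-- vowels = {"a", "e", "i", "o", "u"}
--
-- def can_build(s1, s2):
--     s1_vowels = 0
--     s1_ascii = 0
--     for letter in s1:
--         if letter in vowels:
--             s1_vowels += 1
--         s1_ascii += ord(letter)
--     available_indexes = [i for i in range(len(s2))]
--
--     def build(a_i, combination="", c_vowels=0, c_ascii=0):
--         if s1_ascii == c_ascii and s1_vowels == c_vowels:
--             return True
--         if len(a_i) == 0 or c_vowels > s1_vowels or c_ascii > s1_ascii: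
--             return False
--
--         to_ret = False
--         for elem in a_i:
--             a = [""]*(len(a_i)-1)
--             cnt = 0
--             for elem1 in a_i:
--                 if elem1 != elem:
--                     a[cnt] = elem1
--                     cnt += 1
--             vowel = 1 if s2[elem] in vowels else 0
--             to_ret = to_ret or build(a, combination+s2[elem], c_vowels+vowel, c_ascii+ord(s2[elem]))
--         return to_ret
--     return build(available_indexes)
-- ===== SOURCE B (Python) =====
-- vowels = {"a", "e", "i", "o", "u"}
--
-- def can_build(s1, s2):
--     tv = 0
--     ta = 0
--     for ch in s1:
--         if ch in vowels:
--             tv += 1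
--         ta += ord(ch)
--     # subset-sum DP over (ascii sum, vowel count), pruned at the target
--     reach = {(0, 0)}
--     for ch in s2:
--         o = ord(ch)
--         v = 1 if ch in vowels else 0
--         reach |= {(a + o, c + v) for (a, c) in reach if a + o <= ta and c + v <= tv}
--     return (ta, tv) in reach
-- ===== Notes on version B (the rewrite author's own statement) =====
-- stated objective: faster
-- what changed: Replaces A's recursion over permutations of the remaining s2 indexes by a single left-to-right subset-sum DP maintaining the set of reachable (ascii-sum, vowel-count) pairs pruned at s1's target; intended as faster (measured: A timed out at n=16 where B returned; no clean ratio at a size both finish).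
import Mathlib
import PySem

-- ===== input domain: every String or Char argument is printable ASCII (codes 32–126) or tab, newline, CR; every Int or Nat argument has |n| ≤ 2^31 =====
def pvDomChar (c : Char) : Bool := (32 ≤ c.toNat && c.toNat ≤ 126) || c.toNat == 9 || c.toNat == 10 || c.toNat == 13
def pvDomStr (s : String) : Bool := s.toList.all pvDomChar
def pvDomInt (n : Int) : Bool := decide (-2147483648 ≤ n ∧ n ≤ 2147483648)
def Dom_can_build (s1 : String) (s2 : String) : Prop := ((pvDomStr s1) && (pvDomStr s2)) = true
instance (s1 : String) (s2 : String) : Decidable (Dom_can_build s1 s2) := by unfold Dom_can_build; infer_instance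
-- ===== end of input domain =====

-- B replaces A's recursion over permutations of remaining indexes by a one-pass subset-sum
-- DP over reachable (ascii-sum, vowel-count) pairs; intended as faster (measured: A timed
-- out at n=16 where B returned; no clean ratio at a size both finish). Equivalence is proved
-- via the characterisation "some sub-multiset of s2 hits s1's ascii sum and vowel count".

-- ===== PORT A =====
-- module-level constant: vowels = {"a", "e", "i", "o", "u"}
def pvVowels : PySem.Set Char := PySem.Set.ofList ['a', 'e', 'i', 'o', 'u']

-- termination helper for the recursion on the shrinking index list
theorem pvFilterLt (l : List Int) (e : Int) (he : e ∈ l) :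
    (l.filter (fun x => decide (x ≠ e))).length < l.length :=
  List.length_filter_lt_length_iff_exists.mpr ⟨e, he, by simp⟩

-- A's inner `build(a_i, combination, c_vowels, c_ascii)`; the loop `for elem in a_i: …`
-- is `buildALoop` (iterating over `a_i.attach` so the termination argument sees elem ∈ a_i).
-- `s2[elem]` is ported as pyGetD with a dummy default: every index handed to build comes
-- from range(len(s2)) and filtering, so it is always in range and Python never raises.
mutual
def buildA (s2c : List Char) (s1_vowels s1_ascii : Int) (a_i : List Int)
    (combination : List Char) (c_vowels c_ascii : Int) : Bool :=
  if s1_ascii = c_ascii ∧ s1_vowels = c_vowels then true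
  else if a_i.length = 0 ∨ c_vowels > s1_vowels ∨ c_ascii > s1_ascii then false
  else buildALoop s2c s1_vowels s1_ascii a_i a_i.attach combination c_vowels c_ascii false
termination_by (a_i.length + 1, 0)
decreasing_by exact Prod.Lex.left _ _ (Nat.lt_succ_self _)

def buildALoop (s2c : List Char) (s1_vowels s1_ascii : Int) (a_i : List Int)
    (pending : List {x : Int // x ∈ a_i}) (combination : List Char)
    (c_vowels c_ascii : Int) (to_ret : Bool) : Bool :=
  match pending with
  | [] => to_ret
  | elem :: rest =>
    let a : List Int := a_i.filter (fun elem1 => decide (elem1 ≠ elem.val))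
    let ch : Char := PySem.List.pyGetD s2c elem.val '?'
    let vowel : Int := if PySem.Set.contains pvVowels ch then 1 else 0
    let to_ret' : Bool := to_ret ||
      buildA s2c s1_vowels s1_ascii a (combination ++ [ch])
        (c_vowels + vowel) (c_ascii + (ch.toNat : Int))
    buildALoop s2c s1_vowels s1_ascii a_i rest combination c_vowels c_ascii to_ret'
termination_by (a_i.length, pending.length + 1)
decreasing_by
  · have h := pvFilterLt a_i elem.val elem.property
    rcases Nat.lt_or_ge ((a_i.filter (fun x => decide (x ≠ elem.val))).length + 1) a_i.length with h' | h'
    · exact Prod.Lex.left _ _ h'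
    · have : (a_i.filter (fun x => decide (x ≠ elem.val))).length + 1 = a_i.length := by omega
      rw [this]; exact Prod.Lex.right _ (Nat.succ_pos _)
  · exact Prod.Lex.right _ (Nat.lt_succ_self _)
end

def can_build (s1 : String) (s2 : String) : Bool :=
  let p : Int × Int := s1.toList.foldl
    (fun p letter =>
      ((if PySem.Set.contains pvVowels letter then p.1 + 1 else p.1),
       p.2 + (letter.toNat : Int))) (0, 0)
  let available_indexes : List Int := PySem.List.pyRange 0 (PySem.List.len s2.toList) 1
  buildA s2.toList p.1 p.2 available_indexes [] 0 0

-- ===== PORT B =====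
def can_build_alt (s1 : String) (s2 : String) : Bool :=
  let p : Int × Int := s1.toList.foldl
    (fun p ch =>
      ((if PySem.Set.contains pvVowels ch then p.1 + 1 else p.1),
       p.2 + (ch.toNat : Int))) (0, 0)
  let tv : Int := p.1
  let ta : Int := p.2
  let reach : PySem.Set (Int × Int) := s2.toList.foldl
    (fun reach ch =>
      let o : Int := ch.toNat
      let v : Int := if PySem.Set.contains pvVowels ch then 1 else 0
      PySem.Set.union reach (PySem.Set.ofList
        ((reach.filter (fun q => decide (q.1 + o ≤ ta ∧ q.2 + v ≤ tv))).map
          (fun q => (q.1 + o, q.2 + v)))))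
    (PySem.Set.ofList [((0 : Int), (0 : Int))])
  PySem.Set.contains reach (ta, tv)

-- ===== PRECONDITION & SPEC =====
def Spec_can_build (s1 : String) (s2 : String) (out : Bool) : Prop := out = can_build_alt s1 s2
instance (s1 : String) (s2 : String) (out : Bool) : Decidable (Spec_can_build s1 s2 out) := by unfold Spec_can_build; infer_instance

-- ===== CLAIM (what is proved, stated in full; the proofs are below) =====
def Claim_equal_can_build : Prop := ∀ (s1 : String) (s2 : String), Dom_can_build s1 s2 → Spec_can_build s1 s2 (can_build s1 s2)

-- ===== LEMMAS AND PROOFS =====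

-- ascii value and vowel indicator of a character, and their sums over a multiset
def chAscii (c : Char) : Int := c.toNat
def chVow (c : Char) : Int := if PySem.Set.contains pvVowels c then 1 else 0
def asciiSum (m : Multiset Char) : Int := (m.map chAscii).sum
def vowSum (m : Multiset Char) : Int := (m.map chVow).sum

theorem asciiSum_nonneg (m : Multiset Char) : 0 ≤ asciiSum m := by
  refine Multiset.sum_nonneg ?_
  intro x hx
  obtain ⟨c, _, rfl⟩ := Multiset.mem_map.mp hx
  exact Int.natCast_nonneg _

theorem vowSum_nonneg (m : Multiset Char) : 0 ≤ vowSum m := by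
  refine Multiset.sum_nonneg ?_
  intro x hx
  obtain ⟨c, _, rfl⟩ := Multiset.mem_map.mp hx
  unfold chVow; split <;> omega

theorem buildALoop_eq (s2c : List Char) (tv ta : Int) (a_i : List Int)
    (pending : List {x : Int // x ∈ a_i}) (comb : List Char) (cv ca : Int) (b : Bool) :
    buildALoop s2c tv ta a_i pending comb cv ca b
      = (b || pending.any (fun e =>
          buildA s2c tv ta (a_i.filter (fun x => decide (x ≠ e.val)))
            (comb ++ [PySem.List.pyGetD s2c e.val '?'])
            (cv + chVow (PySem.List.pyGetD s2c e.val '?'))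
            (ca + chAscii (PySem.List.pyGetD s2c e.val '?')))) := by
  induction pending generalizing b with
  | nil => simp [buildALoop]
  | cons e rest ih =>
    rw [buildALoop]
    simp only [ih, List.any_cons, chVow, chAscii, Bool.or_assoc]

theorem buildA_iff (s2c : List Char) (tv ta : Int) :
    ∀ (n : Nat) (a_i : List Int), a_i.length = n → a_i.Nodup →
      ∀ (comb : List Char) (cv ca : Int),
      (buildA s2c tv ta a_i comb cv ca = true ↔
        ∃ m : Multiset Char,
          m ≤ ↑(a_i.map (fun i => PySem.List.pyGetD s2c i '?')) ∧
          cv + vowSum m = tv ∧ ca + asciiSum m = ta) := by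
  intro n
  induction n using Nat.strong_induction_on with
  | _ n ih =>
    intro a_i hlen hnd comb cv ca
    rw [buildA]
    by_cases h1 : ta = ca ∧ tv = cv
    · rw [if_pos h1]
      simp only [true_iff]
      exact ⟨0, Multiset.zero_le _, by simp [vowSum]; omega, by simp [asciiSum]; omega⟩
    · rw [if_neg h1]
      by_cases h2 : a_i.length = 0 ∨ cv > tv ∨ ca > ta
      · rw [if_pos h2]
        simp only [Bool.false_eq_true, false_iff]
        rintro ⟨m, hm, hv, ha⟩
        have hvn := vowSum_nonneg m
        have han := asciiSum_nonneg m
        rcases h2 with h2 | h2 | h2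
        · have : a_i = [] := List.length_eq_zero_iff.mp h2
          subst this
          have : m = 0 := Multiset.le_zero.mp (by simpa using hm)
          subst this
          simp [vowSum, asciiSum] at hv ha
          exact h1 ⟨by omega, by omega⟩
        · omega
        · omega
      · rw [if_neg h2]
        rw [buildALoop_eq]
        simp only [Bool.false_or, List.any_eq_true]
        constructor
        · rintro ⟨e, -, hg⟩
          have hei : e.val ∈ a_i := e.property
          have hlt : (a_i.filter (fun x => decide (x ≠ e.val))).length < n := by
            rw [← hlen]; exact pvFilterLt a_i e.val hei
          have hndf : (a_i.filter (fun x => decide (x ≠ e.val))).Nodup := hnd.filter _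
          obtain ⟨m', hm', hv', ha'⟩ :=
            (ih _ hlt _ rfl hndf _ _ _).mp hg
          refine ⟨PySem.List.pyGetD s2c e.val '?' ::ₘ m', ?_, ?_, ?_⟩
          · have hperm : a_i.Perm (e.val :: a_i.erase e.val) := List.perm_cons_erase hei
            have hcoe : (↑(a_i.map (fun i => PySem.List.pyGetD s2c i '?')) : Multiset Char)
                = PySem.List.pyGetD s2c e.val '?' ::ₘ
                  ↑((a_i.erase e.val).map (fun i => PySem.List.pyGetD s2c i '?')) := by
              rw [← Multiset.map_coe, ← Multiset.map_coe,
                Multiset.coe_eq_coe.mpr hperm]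
              simp
            rw [hcoe]
            refine Multiset.cons_le_cons _ ?_
            have herase : a_i.erase e.val = a_i.filter (fun x => decide (x ≠ e.val)) := by
              rw [hnd.erase_eq_filter]
              congr 1
              funext x
              simp [bne]; exact Bool.beq_eq_decide_eq x _
            rw [herase]; exact hm'
          · simp only [vowSum, Multiset.map_cons, Multiset.sum_cons] at *
            omega
          · simp only [asciiSum, Multiset.map_cons, Multiset.sum_cons] at *
            omega
        · rintro ⟨m, hm, hv, ha⟩
          have hmne : m ≠ 0 := by
            rintro rfl
            simp [vowSum, asciiSum] at hv ha
            exact h1 ⟨by omega, by omega⟩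
          obtain ⟨x, hx⟩ := Multiset.exists_mem_of_ne_zero hmne
          have hx2 : x ∈ a_i.map (fun i => PySem.List.pyGetD s2c i '?') := by
            have := Multiset.mem_of_le hm hx
            simpa using this
          obtain ⟨i, hi, hfi⟩ := List.mem_map.mp hx2
          refine ⟨⟨i, hi⟩, List.mem_attach _ _, ?_⟩
          have hlt : (a_i.filter (fun x => decide (x ≠ i))).length < n := by
            rw [← hlen]; exact pvFilterLt a_i i hi
          have hndf : (a_i.filter (fun x => decide (x ≠ i))).Nodup := hnd.filter _
          refine (ih _ hlt _ rfl hndf _ _ _).mpr ⟨m.erase x, ?_, ?_, ?_⟩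
          · have hperm : a_i.Perm (i :: a_i.erase i) := List.perm_cons_erase hi
            have hcoe : (↑(a_i.map (fun j => PySem.List.pyGetD s2c j '?')) : Multiset Char)
                = x ::ₘ ↑((a_i.erase i).map (fun j => PySem.List.pyGetD s2c j '?')) := by
              rw [← Multiset.map_coe, ← Multiset.map_coe,
                Multiset.coe_eq_coe.mpr hperm]
              simp [hfi]
            have herase : a_i.erase i = a_i.filter (fun x => decide (x ≠ i)) := by
              rw [hnd.erase_eq_filter]
              congr 1
              funext x
              simp [bne]; exact Bool.beq_eq_decide_eq x _
            have := Multiset.erase_le_erase x hm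
            rw [hcoe, Multiset.erase_cons_head, herase] at this
            exact this
          · have hsplit : m = x ::ₘ m.erase x := (Multiset.cons_erase hx).symm
            have : vowSum m = chVow x + vowSum (m.erase x) := by
              conv_lhs => rw [hsplit]
              simp [vowSum]
            rw [hfi]
            omega
          · have hsplit : m = x ::ₘ m.erase x := (Multiset.cons_erase hx).symm
            have : asciiSum m = chAscii x + asciiSum (m.erase x) := by
              conv_lhs => rw [hsplit]
              simp [asciiSum]
            rw [hfi]
            omega

-- B's DP state after scanning a prefix of s2
def reachB (ta tv : Int) (l : List Char) : PySem.Set (Int × Int) :=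
  l.foldl
    (fun reach ch =>
      let o : Int := ch.toNat
      let v : Int := if PySem.Set.contains pvVowels ch then 1 else 0
      PySem.Set.union reach (PySem.Set.ofList
        ((reach.filter (fun q => decide (q.1 + o ≤ ta ∧ q.2 + v ≤ tv))).map
          (fun q => (q.1 + o, q.2 + v)))))
    (PySem.Set.ofList [((0 : Int), (0 : Int))])

theorem mem_reachB (ta tv : Int) (l : List Char) (a c : Int) :
    ((a, c) ∈ reachB ta tv l) ↔
      ∃ m : Multiset Char, m ≤ ↑l ∧ asciiSum m = a ∧ vowSum m = c ∧
        (m = 0 ∨ (a ≤ ta ∧ c ≤ tv)) := by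
  induction l using List.reverseRecOn generalizing a c with
  | nil =>
    simp only [reachB, List.foldl_nil]
    constructor
    · intro h
      have heq : (a, c) = ((0 : Int), (0 : Int)) := by
        simpa [PySem.Set.ofList] using h
      rw [Prod.mk.injEq] at heq
      obtain ⟨rfl, rfl⟩ := heq
      exact ⟨0, le_refl _, by simp [asciiSum], by simp [vowSum], Or.inl rfl⟩
    · rintro ⟨m, hm, ha, hc, -⟩
      have : m = 0 := Multiset.le_zero.mp (by simpa using hm)
      subst this
      simp only [asciiSum, vowSum, Multiset.map_zero, Multiset.sum_zero] at ha hc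
      simp [PySem.Set.ofList, ← ha, ← hc]
  | append_singleton l ch ihl =>
    have hstep : reachB ta tv (l ++ [ch]) =
        (let o : Int := ch.toNat
         let v : Int := if PySem.Set.contains pvVowels ch then 1 else 0
         PySem.Set.union (reachB ta tv l) (PySem.Set.ofList
          (((reachB ta tv l).filter (fun q => decide (q.1 + o ≤ ta ∧ q.2 + v ≤ tv))).map
            (fun q => (q.1 + o, q.2 + v))))) := by
      simp only [reachB, List.foldl_append, List.foldl_cons, List.foldl_nil]
    rw [hstep]
    simp only [PySem.Set.mem_union, PySem.Set.mem_ofList, List.mem_map, List.mem_filter]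
    have hcoe : (↑(l ++ [ch]) : Multiset Char) = ch ::ₘ ↑l := by
      simp [Multiset.cons_coe]
    constructor
    · rintro (h | ⟨q, ⟨hq, hcond⟩, heq⟩)
      · obtain ⟨m, hm, ha, hc, hor⟩ := (ihl a c).mp h
        exact ⟨m, by rw [hcoe]; exact le_trans hm (Multiset.le_cons_self _ _), ha, hc, hor⟩
      · obtain ⟨m, hm, ha, hc, -⟩ := (ihl q.1 q.2).mp hq
        have heq1 : q.1 + (ch.toNat : Int) = a := congrArg Prod.fst heq
        have heq2 : q.2 + (if PySem.Set.contains pvVowels ch then (1:Int) else 0) = c :=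
          congrArg Prod.snd heq
        simp only [decide_eq_true_eq] at hcond
        refine ⟨ch ::ₘ m, ?_, ?_, ?_, Or.inr ⟨by omega, by omega⟩⟩
        · rw [hcoe]; exact Multiset.cons_le_cons _ hm
        · have : asciiSum (ch ::ₘ m) = chAscii ch + asciiSum m := by
            simp [asciiSum]
          rw [this, ha]; simp only [chAscii]; omega
        · have : vowSum (ch ::ₘ m) = chVow ch + vowSum m := by
            simp [vowSum]
          rw [this, hc]; simp only [chVow]; omega
    · rintro ⟨m, hm, ha, hc, hor⟩
      rw [hcoe] at hm
      by_cases hch : ch ∈ m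
      · right
        have hsplit : ch ::ₘ m.erase ch = m := Multiset.cons_erase hch
        have hle : m.erase ch ≤ ↑l := by
          have := Multiset.erase_le_erase ch hm
          rwa [Multiset.erase_cons_head] at this
        have hane : m ≠ 0 := by
          intro h0; rw [h0] at hch; simp at hch
        have hbounds : a ≤ ta ∧ c ≤ tv := hor.resolve_left hane
        have hsa : asciiSum m = chAscii ch + asciiSum (m.erase ch) := by
          conv_lhs => rw [← hsplit]
          simp [asciiSum]
        have hsv : vowSum m = chVow ch + vowSum (m.erase ch) := by
          conv_lhs => rw [← hsplit]
          simp [vowSum]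
        have hvnn : 0 ≤ vowSum (m.erase ch) := vowSum_nonneg _
        have hann : 0 ≤ asciiSum (m.erase ch) := asciiSum_nonneg _
        have hchnn : (0 : Int) ≤ chAscii ch := Int.natCast_nonneg _
        have hchv : (0 : Int) ≤ chVow ch := by unfold chVow; split <;> omega
        have hmem : (asciiSum (m.erase ch), vowSum (m.erase ch)) ∈ reachB ta tv l := by
          refine (ihl _ _).mpr ⟨m.erase ch, hle, rfl, rfl, ?_⟩
          exact Or.inr ⟨by omega, by omega⟩
        refine ⟨(asciiSum (m.erase ch), vowSum (m.erase ch)), ⟨hmem, ?_⟩, ?_⟩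
        · simp only [decide_eq_true_eq]
          constructor
          · simp only [chAscii] at hsa; omega
          · simp only [chVow] at hsv; omega
        · simp only [chAscii] at hsa
          simp only [chVow] at hsv
          simp only [Prod.mk.injEq]
          constructor <;> omega
      · left
        refine (ihl a c).mpr ⟨m, ?_, ha, hc, hor⟩
        rw [Multiset.le_iff_count] at hm ⊢
        intro x
        have := hm x
        by_cases hx : x = ch
        · subst hx; simp [Multiset.count_eq_zero_of_notMem hch]
        · rw [Multiset.count_cons_of_ne hx] at this
          exact this

-- ===== VERDICT (by name: the statement is the Claim_ definition above) =====
theorem pyRange_len_nodup (xs : List Char) :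
    (PySem.List.pyRange 0 (PySem.List.len xs) 1).Nodup := by
  have : PySem.List.len xs = ((xs.length : Nat) : Int) := by
    simp [PySem.List.len_eq]
  rw [this, PySem.List.pyRange_zero_natCast]
  exact List.Nodup.map (fun a b h => by exact_mod_cast h) List.nodup_range

theorem can_build_spec : Claim_equal_can_build := by
  intro s1 s2 _
  unfold Spec_can_build
  rw [Bool.eq_iff_iff]
  unfold can_build can_build_alt
  set q : Int × Int := s1.toList.foldl
    (fun p letter =>
      ((if PySem.Set.contains pvVowels letter then p.1 + 1 else p.1),
       p.2 + (letter.toNat : Int))) (0, 0) with hq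
  constructor
  · intro h
    obtain ⟨m, hm, hv, ha⟩ :=
      (buildA_iff s2.toList q.1 q.2 _ _ rfl (pyRange_len_nodup s2.toList) [] 0 0).mp h
    rw [PySem.List.map_pyGetD_pyRange_zero s2.toList '?'] at hm
    refine (PySem.Set.contains_iff _ _).mpr ?_
    exact (mem_reachB q.2 q.1 s2.toList q.2 q.1).mpr
      ⟨m, hm, by omega, by omega, Or.inr ⟨le_refl _, le_refl _⟩⟩
  · intro h
    obtain ⟨m, hm, ha, hv, -⟩ :=
      (mem_reachB q.2 q.1 s2.toList q.2 q.1).mp ((PySem.Set.contains_iff _ _).mp h)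
    refine (buildA_iff s2.toList q.1 q.2 _ _ rfl (pyRange_len_nodup s2.toList) [] 0 0).mpr ?_
    refine ⟨m, ?_, by omega, by omega⟩
    rw [PySem.List.map_pyGetD_pyRange_zero s2.toList '?']
    exact hm
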